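-- pv_equiv track=rewrite | github.com/anthonyceponis/british-informatics-olympiad-solutions | 2017/[1]-coloured-triangles.py | getFinalLetter
-- ===== SOURCE A (Python) =====
-- def getOpposite(col1, col2):
--     cols = [col1, col2]
--     r_found = False
--     g_found = False
--     b_found = False
--
--     for i in cols:
--         if (i == "R"): r_found = True
--         elif (i == "G"): g_found = True
--         elif (i == "B"): b_found = True
--
--     if (r_found == False): return "R"
--     elif (g_found == False): return "G"
--     elif (b_found == False): return "B"
--
-- def getFinalLetter(firstRow):
--     row1 = firstRow
--     row2 = ""
--     while (len(row1) >=2):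
--         for i in range(len(row1)-1):
--             if (row1[i] == row1[i+1]): row2 += row1[i]
--             else: row2 += getOpposite(row1[i], row1[i+1])
--         row1 = row2
--         row2 = ""
--     return row1
-- ===== SOURCE B (Python) =====
-- # B: evaluates the reduction pyramid in ONE left-to-right sweep over the input,
-- # maintaining the current anti-diagonal (cell t = result of reducing the last
-- # t+1 characters), instead of A's repeated whole-row rewriting.
--
-- def combine(col1, col2):
--     for c in "RGB":
--         if c != col1 and c != col2:
--             return c
--
-- def getFinalLetter(firstRow):
--     diag = []
--     for ch in firstRow:
--         prev = ch
--         new = [ch]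
--         for d in diag:
--             prev = d if d == prev else combine(d, prev)
--             new.append(prev)
--         diag = new
--     return diag[-1] if diag else ""
-- ===== Notes on version B (the rewrite author's own statement) =====
-- stated objective: faster
-- what changed: Replaces A's repeated whole-row rewriting (building a new string per level, flag-scanning getOpposite per pair) by a single left-to-right sweep that maintains the pyramid's current anti-diagonal in a list, combining with the first colour not among the pair.
import Mathlib
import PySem

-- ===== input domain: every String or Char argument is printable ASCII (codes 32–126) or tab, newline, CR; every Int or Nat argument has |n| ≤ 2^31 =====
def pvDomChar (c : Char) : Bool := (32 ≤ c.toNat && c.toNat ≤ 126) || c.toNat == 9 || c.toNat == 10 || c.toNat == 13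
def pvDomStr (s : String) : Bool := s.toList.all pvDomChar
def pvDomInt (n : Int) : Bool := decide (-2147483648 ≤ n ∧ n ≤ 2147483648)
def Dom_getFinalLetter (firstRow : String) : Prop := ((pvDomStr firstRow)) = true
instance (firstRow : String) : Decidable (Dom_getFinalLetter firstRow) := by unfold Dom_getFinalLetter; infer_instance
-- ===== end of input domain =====

-- B evaluates the reduction pyramid in one left-to-right sweep that maintains the
-- current anti-diagonal, instead of A's repeated whole-row rewriting (objective: faster
-- by a constant factor; same O(n^2) worst case).

-- ===== PORT A =====

-- getOpposite: the two flag-setting iterations over cols = [col1, col2], then the elif chain.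
-- The final "" stands for Python's implicit `return None`, unreachable for a two-element
-- cols list (at most two flags can be set).
def getOppositeA (col1 col2 : Char) : String :=
  let flags : Bool × Bool × Bool :=
    [col1, col2].foldl
      (fun f i =>
        if i = 'R' then (true, f.2.1, f.2.2)
        else if i = 'G' then (f.1, true, f.2.2)
        else if i = 'B' then (f.1, f.2.1, true)
        else f)
      (false, false, false)
  if flags.1 = false then "R"
  else if flags.2.1 = false then "G"
  else if flags.2.2 = false then "B"
  else ""

-- the inner `for i in range(len(row1)-1)` loop building row2 (indices are always in range)
def stepA (row1 : List Char) : List Char :=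
  (List.range (row1.length - 1)).foldl
    (fun row2 i =>
      if row1.getD i ' ' = row1.getD (i + 1) ' ' then row2 ++ [row1.getD i ' ']
      else row2 ++ (getOppositeA (row1.getD i ' ') (row1.getD (i + 1) ' ')).toList)
    []

-- each appended chunk has length ≤ 1, so one pass never grows the row (for termination)
theorem getOppositeA_len (a b : Char) : (getOppositeA a b).toList.length ≤ 1 := by
  simp only [getOppositeA, List.foldl]
  split_ifs <;> decide

theorem stepA_len (l : List Char) : (stepA l).length ≤ l.length - 1 := by
  unfold stepA
  have h : ∀ (n : Nat) (acc : List Char),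
      ((List.range n).foldl
        (fun row2 i =>
          if l.getD i ' ' = l.getD (i + 1) ' ' then row2 ++ [l.getD i ' ']
          else row2 ++ (getOppositeA (l.getD i ' ') (l.getD (i + 1) ' ')).toList)
        acc).length ≤ acc.length + n := by
    intro n
    induction n with
    | zero => intro acc; simp
    | succ m ih =>
      intro acc
      rw [List.range_succ, List.foldl_append]
      have h1 := ih acc
      simp only [List.foldl]
      split
      · simp only [List.length_append, List.length_cons, List.length_nil]
        omega
      · have h2 := getOppositeA_len (l.getD m ' ') (l.getD (m + 1) ' ')
        simp only [List.length_append]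
        omega
  simpa using h (l.length - 1) []

-- the while-loop: while len(row1) >= 2: row1 = one pass
def loopA (row1 : List Char) : List Char :=
  if h : 2 ≤ row1.length then loopA (stepA row1) else row1
termination_by row1.length
decreasing_by
  have := stepA_len row1; omega

def getFinalLetter (firstRow : String) : String :=
  String.ofList (loopA firstRow.toList)

-- ===== PORT B =====

-- combine: the for-loop over "RGB" returning the first colour different from both;
-- getD ' ' stands for Python's implicit `return None`, unreachable at every call site
-- (combine is only reached with col1 ≠ col2, so at most two letters are excluded)
def combineB (col1 col2 : Char) : Char :=
  (("RGB".toList.find? (fun c => c ≠ col1 && c ≠ col2)).getD ' ')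

-- the inner `for d in diag` loop: state = (new, prev)
def diagStep (diag : List Char) (ch : Char) : List Char :=
  (diag.foldl
    (fun st d =>
      let prev := if d = st.2 then d else combineB d st.2
      (st.1 ++ [prev], prev))
    ([ch], ch)).1

def getFinalLetter_alt (firstRow : String) : String :=
  let diag := firstRow.toList.foldl diagStep []
  match diag.getLast? with
  | some c => String.ofList [c]    -- diag[-1]
  | none => ""

-- ===== PRECONDITION & SPEC =====
def Spec_getFinalLetter (firstRow : String) (out : String) : Prop := out = getFinalLetter_alt firstRow
instance (firstRow : String) (out : String) : Decidable (Spec_getFinalLetter firstRow out) := by unfold Spec_getFinalLetter; infer_instance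

-- ===== CLAIM (what is proved, stated in full; the proofs are below) =====
def Claim_equal_getFinalLetter : Prop := ∀ (firstRow : String), Dom_getFinalLetter firstRow → Spec_getFinalLetter firstRow (getFinalLetter firstRow)

-- ===== LEMMAS AND PROOFS =====

-- the combining operation of one adjacent pair, and one whole reduction pass
def comb (a b : Char) : Char := if a = b then a else combineB a b
def red (l : List Char) : List Char := List.zipWith comb l l.tail
-- the apex of the reduction pyramid over l (A's final row, as a single character)
def ap (l : List Char) : Char := (loopA l).headD ' '

theorem chunk_eq (a b : Char) :
    (if a = b then [a] else (getOppositeA a b).toList) = [comb a b] := by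
  unfold comb
  by_cases hab : a = b
  · simp [hab]
  · simp only [if_neg hab]
    by_cases haR : a = 'R' <;> by_cases haG : a = 'G' <;> by_cases haB : a = 'B' <;>
      by_cases hbR : b = 'R' <;> by_cases hbG : b = 'G' <;> by_cases hbB : b = 'B' <;>
      simp_all [getOppositeA, combineB, List.find?, eq_comm]

theorem stepA_eq_red (l : List Char) : stepA l = red l := by
  unfold stepA
  have hf : (fun (row2 : List Char) i =>
      if l.getD i ' ' = l.getD (i + 1) ' ' then row2 ++ [l.getD i ' ']
      else row2 ++ (getOppositeA (l.getD i ' ') (l.getD (i + 1) ' ')).toList) =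
      fun row2 i => row2 ++ [comb (l.getD i ' ') (l.getD (i + 1) ' ')] := by
    funext row2 i
    rw [← chunk_eq]
    split_ifs <;> rfl
  rw [hf, PySem.List.foldl_append_singleton_eq_map, List.nil_append]
  apply List.ext_getElem
  · simp [red]
  · intro i h1 h2
    simp only [List.getElem_map, List.getElem_range, red, List.getElem_zipWith, List.getElem_tail]
    rw [List.length_map, List.length_range] at h1
    rw [List.getD_eq_getElem _ _ (by omega), List.getD_eq_getElem _ _ (by omega)]

theorem red_length (l : List Char) : (red l).length = l.length - 1 := by
  simp [red]

theorem ap_red (l : List Char) (h : 2 ≤ l.length) : ap l = ap (red l) := by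
  unfold ap
  rw [loopA, dif_pos h, stepA_eq_red]

theorem ap_single (a : Char) : ap [a] = a := by
  unfold ap
  rw [loopA, dif_neg (by simp)]
  rfl

theorem loopA_len_one (n : Nat) : ∀ (l : List Char), l.length = n + 1 → (loopA l).length = 1 := by
  induction n with
  | zero =>
    intro l hl
    rw [loopA, dif_neg (by omega)]
    exact hl
  | succ m ih =>
    intro l hl
    rw [loopA, dif_pos (by omega), stepA_eq_red]
    exact ih (red l) (by rw [red_length]; omega)

theorem loopA_eq_ap (l : List Char) (h : l ≠ []) : loopA l = [ap l] := by
  have hl : l.length = (l.length - 1) + 1 := by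
    have : l.length ≠ 0 := by simpa using h
    omega
  have h1 := loopA_len_one (l.length - 1) l hl
  unfold ap
  match hq : loopA l, h1 with
  | [a], _ => rfl

theorem red_dropLast (l : List Char) : red l.dropLast = (red l).dropLast := by
  apply List.ext_getElem
  · simp [red]
  · intro i h1 h2
    simp only [red, List.getElem_dropLast, List.getElem_zipWith, List.getElem_tail]

theorem red_tail (l : List Char) : red l.tail = (red l).tail := by
  apply List.ext_getElem
  · simp [red]
  · intro i h1 h2
    simp only [red, List.getElem_tail, List.getElem_zipWith]

theorem ap_rec_aux (n : Nat) : ∀ (l : List Char), l.length = n + 2 →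
    ap l = comb (ap l.dropLast) (ap l.tail) := by
  induction n with
  | zero =>
    intro l hl
    match l, hl with
    | [a, b], _ =>
      rw [ap_red _ (by omega), show red [a, b] = [comb a b] from rfl, ap_single,
        show ([a, b].dropLast) = [a] from rfl, show ([a, b].tail) = [b] from rfl,
        ap_single, ap_single]
  | succ m ih =>
    intro l hl
    rw [ap_red l (by omega), ih (red l) (by rw [red_length]; omega),
      ← red_dropLast, ← red_tail,
      ← ap_red l.dropLast (by rw [List.length_dropLast]; omega),
      ← ap_red l.tail (by rw [List.length_tail]; omega)]

theorem ap_rec (l : List Char) (h : 2 ≤ l.length) :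
    ap l = comb (ap l.dropLast) (ap l.tail) :=
  ap_rec_aux (l.length - 2) l (by omega)

-- the prefix recurrence computed by the inner loop of B
def q (D : List Char) (c : Char) : Nat → Char
  | 0 => c
  | t + 1 => comb (D.getD t ' ') (q D c t)

theorem q_append (D : List Char) (d c : Char) (t : Nat) (h : t ≤ D.length) :
    q (D ++ [d]) c t = q D c t := by
  induction t with
  | zero => rfl
  | succ m ih =>
    unfold q
    rw [ih (by omega), List.getD_append _ _ _ _ (by omega)]

theorem foldl_diag (c : Char) (D : List Char) :
    D.foldl
      (fun st d =>
        let prev := if d = st.2 then d else combineB d st.2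
        (st.1 ++ [prev], prev))
      ([c], c) =
      ((List.range (D.length + 1)).map (q D c), q D c D.length) := by
  induction D using List.reverseRecOn with
  | nil => rfl
  | append_singleton D d ih =>
    rw [List.foldl_append, ih]
    simp only [List.foldl_cons, List.foldl_nil]
    have hget : (D ++ [d]).getD D.length ' ' = d := by
      rw [List.getD_append_right _ _ _ _ (by omega)]
      simp
    have hq : q (D ++ [d]) c (D.length + 1) =
        comb ((D ++ [d]).getD D.length ' ') (q (D ++ [d]) c D.length) := rfl
    rw [hget, q_append _ _ _ _ (le_refl _)] at hq
    have hprev : (if d = q D c D.length then d else combineB d (q D c D.length)) =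
        q (D ++ [d]) c (D.length + 1) := by
      rw [hq]; rfl
    rw [hprev]
    have hlen2 : (D ++ [d]).length = D.length + 1 := by simp
    rw [hlen2, List.range_succ (n := D.length + 1), List.map_append]
    have hmc : List.map (q (D ++ [d]) c) (List.range (D.length + 1)) =
        List.map (q D c) (List.range (D.length + 1)) := by
      apply List.map_congr_left
      intro t ht
      rw [List.mem_range] at ht
      rw [q_append _ _ _ _ (by omega)]
    rw [hmc]
    rfl

theorem diagStep_eq (D : List Char) (c : Char) :
    diagStep D c = (List.range (D.length + 1)).map (q D c) := by
  unfold diagStep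
  rw [foldl_diag]

theorem diag_inv (l : List Char) :
    l.foldl diagStep [] =
      (List.range l.length).map (fun t => ap (l.drop (l.length - (t + 1)))) := by
  induction l using List.reverseRecOn with
  | nil => rfl
  | append_singleton l c ih =>
    rw [List.foldl_append, List.foldl_cons, List.foldl_nil, ih, diagStep_eq]
    have hkey : ∀ t, t ≤ l.length →
        q ((List.range l.length).map (fun t => ap (l.drop (l.length - (t + 1))))) c t =
          ap ((l ++ [c]).drop (l.length - t)) := by
      intro t
      induction t with
      | zero =>
        intro _
        rw [Nat.sub_zero, List.drop_left]
        exact (ap_single c).symm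
      | succ m ihm =>
        intro hm
        unfold q
        rw [ihm (by omega)]
        have hget : ((List.range l.length).map
            (fun t => ap (l.drop (l.length - (t + 1))))).getD m ' ' =
            ap (l.drop (l.length - (m + 1))) := by
          rw [List.getD_eq_getElem _ _ (by simp; omega), List.getElem_map, List.getElem_range]
        rw [hget]
        have hw : (l ++ [c]).drop (l.length - (m + 1)) =
            l.drop (l.length - (m + 1)) ++ [c] := by
          rw [List.drop_append_of_le_length (by omega)]
        have hlw : ((l ++ [c]).drop (l.length - (m + 1))).length = m + 2 := by
          rw [List.length_drop, List.length_append, List.length_singleton]; omega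
        have hstep : ap ((l ++ [c]).drop (l.length - (m + 1))) =
            comb (ap (l.drop (l.length - (m + 1)))) (ap ((l ++ [c]).drop (l.length - m))) := by
          rw [ap_rec _ (by rw [hlw]; omega)]
          congr 1
          · rw [hw, List.dropLast_concat]
          · rw [List.tail_drop, show l.length - (m + 1) + 1 = l.length - m from by omega]
        rw [hstep]
    rw [List.length_map, List.length_range, List.length_append, List.length_singleton]
    apply List.map_congr_left
    intro t ht
    rw [List.mem_range] at ht
    rw [hkey t (by omega), show l.length + 1 - (t + 1) = l.length - t from by omega]

-- ===== VERDICT (by name: the statement is the Claim_ definition above) =====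
theorem getFinalLetter_spec : Claim_equal_getFinalLetter := by
  intro s _
  unfold Spec_getFinalLetter getFinalLetter getFinalLetter_alt
  by_cases h : s.toList = []
  · rw [h, loopA, dif_neg (by simp)]
    rfl
  · rw [loopA_eq_ap _ h, diag_inv]
    have hlen : 1 ≤ s.toList.length := by
      have : s.toList.length ≠ 0 := by simpa using h
      omega
    have hlast : ((List.range s.toList.length).map
        (fun t => ap (s.toList.drop (s.toList.length - (t + 1))))).getLast? =
        some (ap s.toList) := by
      rw [List.getLast?_eq_getElem?]
      rw [List.getElem?_eq_getElem (by rw [List.length_map, List.length_range]; omega)]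
      rw [List.getElem_map, List.getElem_range]
      congr 2
      rw [List.length_map, List.length_range]
      have : s.toList.length - (s.toList.length - 1 + 1) = 0 := by omega
      rw [this, List.drop_zero]
    simp only [hlast]
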